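-- pv_equiv track=rewrite | github.com/soumyashr/adaptive-assessment-system | backend/irt_engine.py | _count_max_consecutive
-- ===== SOURCE A (Python) =====
-- from typing import List, Tuple, Dict, Optional, Any
--
-- def _count_max_consecutive(response_history: List[bool],
--                            target_response: bool) -> int:
--     """Count maximum consecutive responses of a specific type"""
--     if not response_history:
--         return 0
--
--     max_consecutive = 0
--     current_consecutive = 0
--
--     for response in response_history:
--         if response == target_response:
--             current_consecutive += 1
--             max_consecutive = max(max_consecutive, current_consecutive)
--         else:
--             current_consecutive = 0
--
--     return max_consecutive
-- ===== SOURCE B (Python) =====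
-- from typing import List
--
--
-- def _count_max_consecutive(response_history: List[bool],
--                            target_response: bool) -> int:
--     """Max length of a run of target_response: split into maximal runs, keep best."""
--     best = 0
--     i = 0
--     n = len(response_history)
--     while i < n:
--         j = i
--         while j < n and response_history[j] == response_history[i]:
--             j += 1
--         if response_history[i] == target_response:
--             best = max(best, j - i)
--         i = j
--     return best
-- ===== Notes on version B (the rewrite author's own statement) =====
-- stated objective: alternative
-- what changed: Replaces A's running-counter-with-reset single scan by a run-decomposition: B advances over each maximal run of equal elements at once and takes the max run length among runs matching the target.
import Mathlib
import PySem

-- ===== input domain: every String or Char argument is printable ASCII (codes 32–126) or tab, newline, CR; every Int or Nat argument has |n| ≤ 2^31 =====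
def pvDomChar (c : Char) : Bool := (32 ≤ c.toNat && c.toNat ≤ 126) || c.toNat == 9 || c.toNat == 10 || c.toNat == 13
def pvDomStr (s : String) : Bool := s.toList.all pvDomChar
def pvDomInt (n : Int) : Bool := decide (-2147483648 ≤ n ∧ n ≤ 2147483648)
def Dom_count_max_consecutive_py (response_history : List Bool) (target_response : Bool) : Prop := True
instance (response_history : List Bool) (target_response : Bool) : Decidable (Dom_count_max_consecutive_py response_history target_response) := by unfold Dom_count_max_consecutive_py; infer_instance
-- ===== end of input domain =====

-- B replaces A's running-counter scan by a run-decomposition (advance over each maximal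
-- run of equal elements, keep the best matching run length); alternative, same O(n) cost.

-- ===== PORT A =====
-- A's loop state: (max_consecutive, current_consecutive)
def pvStepA (target_response : Bool) (s : Int × Int) (response : Bool) : Int × Int :=
  if response == target_response then (max s.1 (s.2 + 1), s.2 + 1) else (s.1, 0)

def count_max_consecutive_py (response_history : List Bool) (target_response : Bool) : Int :=
  if response_history = [] then 0
  else (response_history.foldl (pvStepA target_response) (0, 0)).1

-- ===== PORT B =====
-- Source B's outer while loop: consume one maximal run per step (j-i = 1 + length of the
-- equal prefix of the tail), updating the best accumulator.
def pvRunsGo (target_response : Bool) (best : Int) : List Bool → Int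
  | [] => best
  | x :: xs =>
      pvRunsGo target_response
        (if x == target_response then
          max best ((((xs.takeWhile (· == x)).length : Int)) + 1)
        else best)
        (xs.dropWhile (· == x))
  termination_by l => l.length
  decreasing_by
    exact Nat.lt_succ_of_le (List.length_dropWhile_le _ _)

def count_max_consecutive_py_alt (response_history : List Bool) (target_response : Bool) : Int :=
  pvRunsGo target_response 0 response_history

-- ===== PRECONDITION & SPEC =====
def Spec_count_max_consecutive_py (response_history : List Bool) (target_response : Bool) (out : Int) : Prop := out = count_max_consecutive_py_alt response_history target_response
instance (response_history : List Bool) (target_response : Bool) (out : Int) : Decidable (Spec_count_max_consecutive_py response_history target_response out) := by unfold Spec_count_max_consecutive_py; infer_instance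

-- ===== CLAIM (what is proved, stated in full; the proofs are below) =====
def Claim_equal_count_max_consecutive_py : Prop := ∀ (response_history : List Bool) (target_response : Bool), Dom_count_max_consecutive_py response_history target_response → Spec_count_max_consecutive_py response_history target_response (count_max_consecutive_py response_history target_response)

-- ===== LEMMAS AND PROOFS =====

-- A's fold over a block of non-matching elements keeps max and resets the counter.
theorem foldA_miss (t : Bool) (l : List Bool) (hl : ∀ a ∈ l, (a == t) = false)
    (m c : Int) : l.foldl (pvStepA t) (m, c) = (m, if l = [] then c else 0) := by
  induction l generalizing c with
  | nil => simp
  | cons a l ih =>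
      have ha := hl a (by simp)
      have hl' : ∀ b ∈ l, (b == t) = false := fun b hb => hl b (by simp [hb])
      simp [List.foldl_cons, pvStepA, ha, ih hl']

-- A's fold over a block of matching elements adds its length to the counter.
theorem foldA_hit (t : Bool) (l : List Bool) (hl : ∀ a ∈ l, (a == t) = true)
    (m c : Int) :
    l.foldl (pvStepA t) (m, c) =
      (if l = [] then m else max m (c + l.length), c + l.length) := by
  induction l generalizing m c with
  | nil => simp
  | cons a l ih =>
      have ha := hl a (by simp)
      have hl' : ∀ b ∈ l, (b == t) = true := fun b hb => hl b (by simp [hb])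
      simp only [List.foldl_cons, pvStepA, ha, if_true, List.length_cons,
        reduceCtorEq, if_false]
      rw [ih hl']
      simp only [Prod.mk.injEq]
      refine ⟨?_, by push_cast; omega⟩
      split_ifs with h
      · subst h; simp
      · push_cast; omega

-- a leading non-matching element resets A's counter, so the start counter is irrelevant
theorem foldA_reset (t : Bool) (l : List Bool)
    (h : ∀ a ∈ l.head?, (a == t) = false) (m c c' : Int) :
    (l.foldl (pvStepA t) (m, c)).1 = (l.foldl (pvStepA t) (m, c')).1 := by
  cases l with
  | nil => rfl
  | cons a l =>
      have ha : (a == t) = false := h a (by simp)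
      simp [List.foldl_cons, pvStepA, ha]

-- main invariant: A's fold from (m, 0) computes B's accumulator recursion from m
theorem foldA_eq_runsGo (t : Bool) : ∀ (xs : List Bool) (m : Int),
    (xs.foldl (pvStepA t) (m, 0)).1 = pvRunsGo t m xs
  | [], m => by simp [pvRunsGo]
  | x :: tl, m => by
      have hsplit : tl = tl.takeWhile (· == x) ++ tl.dropWhile (· == x) :=
        (List.takeWhile_append_dropWhile).symm
      have htw : ∀ a ∈ tl.takeWhile (· == x), a = x := by
        intro a ha
        simpa using List.mem_takeWhile_imp ha
      have hdwlen : (tl.dropWhile (· == x)).length < (x :: tl).length :=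
        Nat.lt_succ_of_le (List.length_dropWhile_le _ _)
      have hdwhead : ∀ a ∈ (tl.dropWhile (· == x)).head?, (a == x) = false := by
        intro a ha
        have := List.head?_dropWhile_not (· == x) tl
        cases hh : (tl.dropWhile (· == x)).head? with
        | none => simp [hh] at ha
        | some b =>
            rw [hh] at this ha
            simp at ha
            subst ha
            simpa using this
      rw [pvRunsGo]
      conv_lhs => rw [show (x :: tl) = (x :: tl.takeWhile (· == x)) ++ tl.dropWhile (· == x) by
        simpa using hsplit]
      rw [List.foldl_append]
      by_cases hx : x = t
      · have hall : ∀ a ∈ x :: tl.takeWhile (· == x), (a == t) = true := by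
          intro a ha
          rcases List.mem_cons.mp ha with h | h
          · simp [h, hx]
          · simp [htw a h, hx]
        have hdwhead' : ∀ a ∈ (tl.dropWhile (· == x)).head?, (a == t) = false := by
          intro a ha
          have := hdwhead a ha
          rw [← hx]; exact this
        rw [if_pos (by simp [hx]), foldA_hit t _ hall,
          foldA_reset t _ hdwhead' _ _ 0,
          foldA_eq_runsGo t (tl.dropWhile (· == x))]
        have harg : (if (x :: tl.takeWhile (· == x)) = [] then m
            else max m ((0 : Int) + ((x :: tl.takeWhile (· == x)).length : Int)))
            = max m (((tl.takeWhile (· == x)).length : Int) + 1) := by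
          simp only [reduceCtorEq, if_false, List.length_cons]
          push_cast
          omega
        rw [harg]
      · have hall : ∀ a ∈ x :: tl.takeWhile (· == x), (a == t) = false := by
          intro a ha
          rcases List.mem_cons.mp ha with h | h
          · simp [h]; exact hx
          · simp [htw a h]; exact hx
        rw [if_neg (by simp [hx]), foldA_miss t _ hall]
        simp only [reduceCtorEq, if_false]
        exact foldA_eq_runsGo t _ m
  termination_by xs => xs.length
  decreasing_by
    all_goals exact Nat.lt_succ_of_le (List.length_dropWhile_le _ _)

-- ===== VERDICT (by name: the statement is the Claim_ definition above) =====
theorem count_max_consecutive_py_spec : Claim_equal_count_max_consecutive_py := by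
  intro h t _
  unfold Spec_count_max_consecutive_py count_max_consecutive_py count_max_consecutive_py_alt
  cases h with
  | nil => simp [pvRunsGo]
  | cons x tl => simp only [reduceCtorEq, if_false]; exact foldA_eq_runsGo t (x :: tl) 0
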